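-- pv_equiv track=rewrite | github.com/yhk1105/FAI25_Final | agents/rule_base.py | _is_nut
-- ===== SOURCE A (Python) =====
-- def _is_nut(hole_card, community_card):
--     rank_order = '23456789TJQKA'
--     all_cards = hole_card + community_card
--     if len(community_card) < 5:
--         return False
--     suits = [c[0] for c in all_cards]
--     ranks = [c[1] for c in all_cards]
--     for suit in set(suits):
--         suit_cards = [c for c in all_cards if c[0] == suit]
--         suit_ranks = set([c[1] for c in suit_cards])
--         if set('TJQKA').issubset(suit_ranks):
--             return True
--     for suit in set(suits):
--         suit_cards = [c for c in all_cards if c[0] == suit]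
--         if len(suit_cards) >= 5:
--             values = sorted([rank_order.index(c[1]) for c in suit_cards], reverse=True)
--             for i in range(len(values) - 4):
--                 window = values[i:i + 5]
--                 if window[0] - window[4] == 4 and window[0] == 12:
--                     return True
--     if ranks.count('A') == 4:
--         return True
--     for suit in set(suits):
--         suit_cards = [c for c in all_cards if c[0] == suit]
--         if len(suit_cards) >= 5:
--             suit_values = [rank_order.index(c[1]) for c in suit_cards]
--             if max(suit_values) == 12 and ranks.count('A') >= 1:
--                 return True
--     values = sorted(set([rank_order.index(r) for r in ranks]), reverse=True)
--     for i in range(len(values) - 4):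
--         window = values[i:i + 5]
--         if window[0] - window[4] == 4 and window[0] == 12:
--             return True
--     if ranks.count('A') == 3:
--         for r in set(ranks):
--             if r != 'A' and ranks.count(r) >= 2:
--                 return True
--     return False
-- ===== SOURCE B (Python) =====
-- def _is_nut(hole_card, community_card):
--     if len(community_card) < 5:
--         return False
--     all_cards = hole_card + community_card
--     suits = [c[0] for c in all_cards]
--     ranks = [c[1] for c in all_cards]
--     aces = ranks.count('A')
--     return (any(c[1] == 'A' and suits.count(c[0]) >= 5 for c in all_cards)
--             or aces == 4
--             or all(r in ranks for r in 'TJQKA')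
--             or (aces == 3 and any(r != 'A' and ranks.count(r) >= 2 for r in ranks)))
-- ===== Notes on version B (the rewrite author's own statement) =====
-- stated objective: simpler
-- what changed: Replaced A's six-stage scan (per-suit royal-flush subset test, per-suit sorted sliding-window straight-flush scan, per-suit max-based nut-flush test, global dedup-sorted sliding-window broadway scan) by a flat four-test disjunction -- ace-in-a-5-card-suit, four aces, all of TJQKA present, three aces plus a pair -- after proving A's royal-flush and straight-flush stages are subsumed by its own nut-flush test and the window scan equals a membership test.
-- outside the precondition, e.g. on _is_nut([], ['hT', 'hJ', 'hQ', 'hK', 'hA', 's?']): A returns True, B returns True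
import Mathlib
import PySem

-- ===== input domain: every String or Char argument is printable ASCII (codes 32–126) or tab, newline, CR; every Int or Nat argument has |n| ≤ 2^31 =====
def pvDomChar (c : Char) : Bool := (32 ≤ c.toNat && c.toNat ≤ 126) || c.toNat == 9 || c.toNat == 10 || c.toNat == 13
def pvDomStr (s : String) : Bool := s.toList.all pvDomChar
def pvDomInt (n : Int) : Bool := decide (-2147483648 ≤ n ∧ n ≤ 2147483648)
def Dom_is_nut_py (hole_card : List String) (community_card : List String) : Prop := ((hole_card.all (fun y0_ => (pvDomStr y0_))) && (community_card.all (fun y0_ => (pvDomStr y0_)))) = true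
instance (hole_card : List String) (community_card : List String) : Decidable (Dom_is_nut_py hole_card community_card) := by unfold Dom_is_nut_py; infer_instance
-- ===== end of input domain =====

-- B flattens A's six hand checks into four set/count tests (no sorting, no sliding windows): simpler, same results.


-- ===== PORT A =====
-- rank_order = '23456789TJQKA'
def pvRankOrder : List Char := ['2','3','4','5','6','7','8','9','T','J','Q','K','A']
-- c[i] for a card string; total form of PySem's pyGet? — Pre_ keeps every accessed index in range
def pvCharAt (s : String) (i : Int) : Char := PySem.List.pyGetD s.toList i ' '
-- rank_order.index(r); Pre_ keeps r a member (Python raises ValueError otherwise)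
def pvRankIdx (r : Char) : Int := ((pvRankOrder.idxOf r : Nat) : Int)

def is_nut_py (hole_card : List String) (community_card : List String) : Bool :=
  let all_cards := hole_card ++ community_card
  if community_card.length < 5 then false
  else
    let suits := all_cards.map (fun c => pvCharAt c 0)
    let ranks := all_cards.map (fun c => pvCharAt c 1)
    let suitSet : PySem.Set Char := PySem.Set.ofList suits
    -- 'for suit in set(suits): … return True' — an early-True loop over a set is 'any' (order-independent)
    let royal := suitSet.any (fun suit =>
      let suit_cards := all_cards.filter (fun c => pvCharAt c 0 == suit)
      let suit_ranks : PySem.Set Char := PySem.Set.ofList (suit_cards.map (fun c => pvCharAt c 1))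
      PySem.Set.issubset (PySem.Set.ofList ['T','J','Q','K','A']) suit_ranks)
    let sflush := suitSet.any (fun suit =>
      let suit_cards := all_cards.filter (fun c => pvCharAt c 0 == suit)
      if 5 ≤ suit_cards.length then
        let values := PySem.List.sorted (suit_cards.map (fun c => pvRankIdx (pvCharAt c 1))) (fun v => v) true
        (PySem.List.pyRange 0 ((values.length : Int) - 4) 1).any (fun i =>
          let window := PySem.List.slice values (some i) (some (i + 5))
          (PySem.List.pyGetD window 0 0 - PySem.List.pyGetD window 4 0 == 4) &&
          (PySem.List.pyGetD window 0 0 == 12))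
      else false)
    let fourAces := PySem.List.count ranks 'A' == 4
    let nutFlush := suitSet.any (fun suit =>
      let suit_cards := all_cards.filter (fun c => pvCharAt c 0 == suit)
      if 5 ≤ suit_cards.length then
        let suit_values := suit_cards.map (fun c => pvRankIdx (pvCharAt c 1))
        ((PySem.List.max? suit_values (fun v => v)).getD 0 == 12) && (1 ≤ PySem.List.count ranks 'A')
      else false)
    let gvalues := PySem.List.sorted (PySem.Set.ofList (ranks.map pvRankIdx)) (fun v => v) true
    let straight := (PySem.List.pyRange 0 ((gvalues.length : Int) - 4) 1).any (fun i =>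
      let window := PySem.List.slice gvalues (some i) (some (i + 5))
      (PySem.List.pyGetD window 0 0 - PySem.List.pyGetD window 4 0 == 4) &&
      (PySem.List.pyGetD window 0 0 == 12))
    let acesFull := (PySem.List.count ranks 'A' == 3) &&
      (PySem.Set.ofList ranks).any (fun r => r != 'A' && 2 ≤ PySem.List.count ranks r)
    royal || sflush || fourAces || nutFlush || straight || acesFull

-- ===== PORT B =====
def is_nut_py_alt (hole_card : List String) (community_card : List String) : Bool :=
  if community_card.length < 5 then false
  else
    let all_cards := hole_card ++ community_card
    let suits := all_cards.map (fun c => pvCharAt c 0)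
    let ranks := all_cards.map (fun c => pvCharAt c 1)
    let aces := PySem.List.count ranks 'A'
    (all_cards.any (fun c => pvCharAt c 1 == 'A' && 5 ≤ PySem.List.count suits (pvCharAt c 0)))
    || (aces == 4)
    || (['T','J','Q','K','A'].all (fun r => ranks.contains r))
    || ((aces == 3) && ranks.any (fun r => r != 'A' && 2 ≤ PySem.List.count ranks r))

-- ===== PRECONDITION & SPEC =====
-- Pre_ excludes (only when the board has ≥5 cards, where A inspects c[0]/c[1]/rank_order.index) cards shorter
-- than 2 characters (A raises IndexError) and cards whose rank character is not in '23456789TJQKA' (A raises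
-- ValueError from rank_order.index, except when an earlier hand test happens to return True first, an order
-- accident of Python's set iteration; on those B returns the same True — see cites).
def Pre_is_nut_py (hole_card : List String) (community_card : List String) : Prop :=
  community_card.length < 5 ∨
    ∀ c ∈ hole_card ++ community_card,
      2 ≤ c.toList.length ∧ c.toList.getD 1 ' ' ∈ ['2','3','4','5','6','7','8','9','T','J','Q','K','A']
instance (hole_card : List String) (community_card : List String) : Decidable (Pre_is_nut_py hole_card community_card) := by unfold Pre_is_nut_py; infer_instance

def pvWitness_is_nut_py : List String × List String :=
  (["hA", "sA"], ["cA", "dA", "h2", "h3", "h4"])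

def Spec_is_nut_py (hole_card : List String) (community_card : List String) (out : Bool) : Prop := out = is_nut_py_alt hole_card community_card
instance (hole_card : List String) (community_card : List String) (out : Bool) : Decidable (Spec_is_nut_py hole_card community_card out) := by unfold Spec_is_nut_py; infer_instance

-- ===== CLAIM (what is proved, stated in full; the proofs are below) =====
def Claim_equal_is_nut_py : Prop := ∀ (hole_card : List String) (community_card : List String), Dom_is_nut_py hole_card community_card → Pre_is_nut_py hole_card community_card → Spec_is_nut_py hole_card community_card (is_nut_py hole_card community_card)


-- ===== LEMMAS AND PROOFS =====

-- pvCharAt at index 1 is List.getD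
theorem pvCharAt_eq (s : String) : pvCharAt s 1 = s.toList.getD 1 ' ' :=
  PySem.List.pyGetD_ofNat' ..

theorem pvRankIdx_le_of_mem (r : Char) (h : r ∈ pvRankOrder) : pvRankIdx r ≤ 12 := by
  fin_cases h <;> decide

theorem pvRankIdx_eq_of_mem (r c : Char) (hc : c ∈ pvRankOrder) (h : pvRankIdx r = pvRankIdx c) : r = c := by
  by_cases hr : r ∈ pvRankOrder
  · simp only [pvRankIdx, Nat.cast_inj] at h
    exact (List.idxOf_inj hr).mp h
  · exfalso
    have h13n : List.idxOf r pvRankOrder = 13 := by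
      rw [List.idxOf_eq_length_iff.mpr hr]
      rfl
    have h13 : pvRankIdx r = 13 := by
      simp [pvRankIdx, h13n]
    have hle := pvRankIdx_le_of_mem c hc
    omega

-- count over a mapped list is a countP over the original
theorem pv_count_map (l : List String) (f : String → Char) (x : Char) :
    PySem.List.count (l.map f) x = l.countP (fun c => f c == x) := by
  rw [PySem.List.count_eq, List.count_eq_countP, List.countP_map]; rfl

theorem pv_count_filter (l : List String) (f : String → Char) (x : Char) :
    PySem.List.count (l.map f) x = (l.filter (fun c => f c == x)).length := by
  rw [pv_count_map, List.countP_eq_length_filter]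

-- the sliding-window scan of A, characterised by two indexed values
theorem pv_window_any (L : List Int) :
    ((PySem.List.pyRange 0 ((L.length : Int) - 4) 1).any (fun i =>
        (PySem.List.pyGetD (PySem.List.slice L (some i) (some (i + 5))) 0 0 -
          PySem.List.pyGetD (PySem.List.slice L (some i) (some (i + 5))) 4 0 == 4) &&
        (PySem.List.pyGetD (PySem.List.slice L (some i) (some (i + 5))) 0 0 == 12)) = true) ↔
    ∃ k : Nat, k + 4 < L.length ∧ L[k]? = some 12 ∧ L[k + 4]? = some 8 := by
  rw [List.any_eq_true]
  constructor
  · rintro ⟨i, hi, hcond⟩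
    rw [PySem.List.mem_pyRange_one] at hi
    obtain ⟨hi0, hilt⟩ := hi
    have hk4 : i.toNat + 4 < L.length := by omega
    have hsl : PySem.List.slice L (some i) (some (i + 5)) = (L.drop i.toNat).take 5 := by
      rw [PySem.List.slice_toNat L hi0 (by omega)]
      congr 1
      omega
    rw [hsl, PySem.List.pyGetD_zero, PySem.List.pyGetD_ofNat'] at hcond
    have h0 : ((L.drop i.toNat).take 5)[0]? = L[i.toNat]? := by
      simp [List.getElem?_drop]
    have h4 : ((L.drop i.toNat).take 5)[4]? = L[i.toNat + 4]? := by
      simp [List.getElem?_drop]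
    have e0 : L[i.toNat]? = some (L[i.toNat]'(by omega)) := List.getElem?_eq_getElem _
    have e4 : L[i.toNat + 4]? = some (L[i.toNat + 4]'hk4) := List.getElem?_eq_getElem _
    rw [List.getD_eq_getElem?_getD, List.getD_eq_getElem?_getD, h0, h4, e0, e4] at hcond
    simp only [Option.getD_some, Bool.and_eq_true, beq_iff_eq] at hcond
    exact ⟨i.toNat, hk4, by rw [e0, hcond.2], by rw [e4]; congr 1; omega⟩
  · rintro ⟨k, hk, h12, h8⟩
    refine ⟨(k : Int), ?_, ?_⟩
    · rw [PySem.List.mem_pyRange_one]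
      refine ⟨by positivity, by omega⟩
    · have hsl : PySem.List.slice L (some (k : Int)) (some ((k : Int) + 5)) = (L.drop k).take 5 := by
        rw [PySem.List.slice_toNat L (by positivity) (by positivity)]
        congr 1
        omega
      have h0 : ((L.drop k).take 5)[0]? = L[k]? := by
        simp [List.getElem?_drop]
      have h4 : ((L.drop k).take 5)[4]? = L[k + 4]? := by
        simp [List.getElem?_drop]
      rw [hsl, PySem.List.pyGetD_zero, PySem.List.pyGetD_ofNat',
        List.getD_eq_getElem?_getD, List.getD_eq_getElem?_getD, h0, h4, h12, h8]
      simp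

-- pull the maximal element off a strictly-descending list
theorem pv_desc_pull (G : List Int) (v : Int) (hp : G.Pairwise (fun a b => b < a))
    (hm : v ∈ G) (hub : ∀ w ∈ G, w ≤ v) :
    ∃ t, G = v :: t ∧ t.Pairwise (fun a b => b < a) ∧ (∀ w ∈ t, w ≤ v - 1) ∧
      ∀ u ∈ G, u ≠ v → u ∈ t := by
  cases G with
  | nil => cases hm
  | cons h t =>
    rw [List.pairwise_cons] at hp
    rcases List.mem_cons.mp hm with rfl | hmt
    · refine ⟨t, rfl, hp.2, fun w hw => by have := hp.1 w hw; omega, ?_⟩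
      intro u hu hne
      rcases List.mem_cons.mp hu with rfl | h
      · exact absurd rfl hne
      · exact h
    · have h1 := hp.1 v hmt
      have h2 := hub h (List.mem_cons_self ..)
      exact absurd h2 (by omega)

theorem pv_desc_five (G : List Int) (hp : G.Pairwise (fun a b => b < a)) (hub : ∀ w ∈ G, w ≤ 12)
    (h12 : 12 ∈ G) (h11 : 11 ∈ G) (h10 : 10 ∈ G) (h9 : 9 ∈ G) (h8 : 8 ∈ G) :
    ∃ t, G = 12 :: 11 :: 10 :: 9 :: 8 :: t := by
  obtain ⟨t1, rfl, hp1, hub1, hin1⟩ := pv_desc_pull G 12 hp h12 hub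
  have m11 := hin1 11 h11 (by omega)
  have m10 := hin1 10 h10 (by omega)
  have m9 := hin1 9 h9 (by omega)
  have m8 := hin1 8 h8 (by omega)
  obtain ⟨t2, rfl, hp2, hub2, hin2⟩ := pv_desc_pull t1 11 hp1 m11 (fun w hw => by have := hub1 w hw; omega)
  have m10a := hin2 10 m10 (by omega)
  have m9a := hin2 9 m9 (by omega)
  have m8a := hin2 8 m8 (by omega)
  obtain ⟨t3, rfl, hp3, hub3, hin3⟩ := pv_desc_pull t2 10 hp2 m10a (fun w hw => by have := hub2 w hw; omega)
  have m9b := hin3 9 m9a (by omega)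
  have m8b := hin3 8 m8a (by omega)
  obtain ⟨t4, rfl, hp4, hub4, hin4⟩ := pv_desc_pull t3 9 hp3 m9b (fun w hw => by have := hub3 w hw; omega)
  have m8c := hin4 8 m8b (by omega)
  obtain ⟨t5, rfl, _, _, _⟩ := pv_desc_pull t4 8 hp4 m8c (fun w hw => by have := hub4 w hw; omega)
  exact ⟨t5, rfl⟩

theorem pv_nodup_length_le (l1 l2 : List Char) (h : l1.Nodup) (hs : l1 ⊆ l2) :
    l1.length ≤ l2.length := by
  have h2 : l1.toFinset ⊆ l2.toFinset := by
    intro x hx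
    simp only [List.mem_toFinset] at *
    exact hs hx
  have h3 := Finset.card_le_card h2
  have h4 := List.toFinset_card_le l2
  rw [List.toFinset_card_of_nodup h] at h3
  omega

-- B's first test, reached from a card with rank 'A' in a suit of ≥ 5 cards
theorem pv_b1_intro (all : List String) (c : String) (hc : c ∈ all) (hA : pvCharAt c 1 = 'A')
    (hlen : 5 ≤ (List.filter (fun c' => pvCharAt c' 0 == pvCharAt c 0) all).length) :
    (List.any all fun c =>
      pvCharAt c 1 == 'A' && decide (5 ≤ PySem.List.count (List.map (fun c => pvCharAt c 0) all) (pvCharAt c 0))) = true := by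
  rw [List.any_eq_true]
  refine ⟨c, hc, ?_⟩
  rw [Bool.and_eq_true, beq_iff_eq, decide_eq_true_iff]
  exact ⟨hA, by rw [pv_count_filter]; exact hlen⟩

-- A's royal-flush stage implies B's first test
theorem pv_royal_imp (all : List String)
    (h : (List.any (PySem.Set.ofList (List.map (fun c => pvCharAt c 0) all)) fun suit =>
          (PySem.Set.ofList ['T', 'J', 'Q', 'K', 'A']).issubset
            (PySem.Set.ofList
              (List.map (fun c => pvCharAt c 1) (List.filter (fun c => pvCharAt c 0 == suit) all)))) = true) :
    (List.any all fun c =>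
      pvCharAt c 1 == 'A' && decide (5 ≤ PySem.List.count (List.map (fun c => pvCharAt c 0) all) (pvCharAt c 0))) = true := by
  rw [List.any_eq_true] at h
  obtain ⟨s, _, hsub⟩ := h
  rw [PySem.Set.issubset_iff] at hsub
  have hsub' : ∀ x ∈ (['T', 'J', 'Q', 'K', 'A'] : List Char),
      x ∈ List.map (fun c => pvCharAt c 1) (List.filter (fun c => pvCharAt c 0 == s) all) := by
    intro x hx
    have := hsub x ((PySem.Set.mem_ofList _ _).mpr hx)
    exact (PySem.Set.mem_ofList _ _).mp this
  have hAmem := hsub' 'A' (by decide)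
  obtain ⟨c, hcf, hcA⟩ := List.mem_map.mp hAmem
  have hc : c ∈ all := (List.mem_filter.mp hcf).1
  have hcs : pvCharAt c 0 = s := by
    have := (List.mem_filter.mp hcf).2
    rwa [beq_iff_eq] at this
  have hlen : 5 ≤ (List.filter (fun c' => pvCharAt c' 0 == pvCharAt c 0) all).length := by
    rw [hcs]
    have hnd : (['T', 'J', 'Q', 'K', 'A'] : List Char).Nodup := by decide
    have hle := pv_nodup_length_le _ _ hnd hsub'
    rw [List.length_map] at hle
    exact hle
  exact pv_b1_intro all c hc hcA hlen

-- A's straight-flush stage implies B's first test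
theorem pv_sflush_imp (all : List String)
    (h : (List.any (PySem.Set.ofList (List.map (fun c => pvCharAt c 0) all)) fun suit =>
          if 5 ≤ (List.filter (fun c => pvCharAt c 0 == suit) all).length then
            (PySem.List.pyRange 0
                  (↑(PySem.List.sorted
                          (List.map (fun c => pvRankIdx (pvCharAt c 1))
                            (List.filter (fun c => pvCharAt c 0 == suit) all))
                          (fun v => v) true).length -
                    4)).any
              fun i =>
              (PySem.List.pyGetD
                      (PySem.List.slice
                        (PySem.List.sorted
                          (List.map (fun c => pvRankIdx (pvCharAt c 1))
                            (List.filter (fun c => pvCharAt c 0 == suit) all))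
                          (fun v => v) true)
                        (some i) (some (i + 5)))
                      0 0 -
                    PySem.List.pyGetD
                      (PySem.List.slice
                        (PySem.List.sorted
                          (List.map (fun c => pvRankIdx (pvCharAt c 1))
                            (List.filter (fun c => pvCharAt c 0 == suit) all))
                          (fun v => v) true)
                        (some i) (some (i + 5)))
                      4 0 ==
                  4) &&
                (PySem.List.pyGetD
                    (PySem.List.slice
                      (PySem.List.sorted
                        (List.map (fun c => pvRankIdx (pvCharAt c 1))
                          (List.filter (fun c => pvCharAt c 0 == suit) all))
                        (fun v => v) true)
                      (some i) (some (i + 5)))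
                    0 0 ==
                  12)
          else false) = true) :
    (List.any all fun c =>
      pvCharAt c 1 == 'A' && decide (5 ≤ PySem.List.count (List.map (fun c => pvCharAt c 0) all) (pvCharAt c 0))) = true := by
  rw [List.any_eq_true] at h
  obtain ⟨s, _, hbody⟩ := h
  by_cases hlen : 5 ≤ (List.filter (fun c => pvCharAt c 0 == s) all).length
  · rw [if_pos hlen] at hbody
    rw [pv_window_any] at hbody
    obtain ⟨k, hk4, h12, _⟩ := hbody
    obtain ⟨hklt, hg12⟩ := List.getElem_of_getElem? h12
    have hmem : (12 : Int) ∈ PySem.List.sorted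
        (List.map (fun c => pvRankIdx (pvCharAt c 1)) (List.filter (fun c => pvCharAt c 0 == s) all))
        (fun v => v) true := hg12 ▸ List.getElem_mem hklt
    rw [PySem.List.mem_sorted] at hmem
    obtain ⟨c, hcf, hcv⟩ := List.mem_map.mp hmem
    have hcA : pvCharAt c 1 = 'A' := pvRankIdx_eq_of_mem _ 'A' (by decide) (by rw [hcv]; decide)
    have hc : c ∈ all := (List.mem_filter.mp hcf).1
    have hcs : pvCharAt c 0 = s := by
      have := (List.mem_filter.mp hcf).2
      rwa [beq_iff_eq] at this
    exact pv_b1_intro all c hc hcA (by rw [hcs]; exact hlen)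
  · rw [if_neg hlen] at hbody
    cases hbody

-- A's nut-flush stage equals B's first test
theorem pv_nut_eq (all : List String) (hv : ∀ c ∈ all, pvCharAt c 1 ∈ pvRankOrder) :
    (List.any (PySem.Set.ofList (List.map (fun c => pvCharAt c 0) all)) fun suit =>
      if 5 ≤ (List.filter (fun c => pvCharAt c 0 == suit) all).length then
        ((PySem.List.max?
              (List.map (fun c => pvRankIdx (pvCharAt c 1)) (List.filter (fun c => pvCharAt c 0 == suit) all))
              fun v => v).getD 0 == 12) &&
          decide (1 ≤ PySem.List.count (List.map (fun c => pvCharAt c 1) all) 'A')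
      else false) =
    (List.any all fun c =>
      pvCharAt c 1 == 'A' && decide (5 ≤ PySem.List.count (List.map (fun c => pvCharAt c 0) all) (pvCharAt c 0))) := by
  apply Bool.coe_iff_coe.mp
  constructor
  · intro h
    rw [List.any_eq_true] at h
    obtain ⟨s, _, hbody⟩ := h
    by_cases hlen : 5 ≤ (List.filter (fun c => pvCharAt c 0 == s) all).length
    · rw [if_pos hlen, Bool.and_eq_true, beq_iff_eq] at hbody
      obtain ⟨hmax, _⟩ := hbody
      set vals := List.map (fun c => pvRankIdx (pvCharAt c 1)) (List.filter (fun c => pvCharAt c 0 == s) all) with hvals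
      have hne : vals ≠ [] := by
        intro hnil
        rw [hvals, List.map_eq_nil_iff] at hnil
        rw [hnil] at hlen
        simp at hlen
      obtain ⟨m, hm⟩ : ∃ m, PySem.List.max? vals (fun v => v) = some m := by
        cases hmq : PySem.List.max? vals (fun v => v) with
        | none => exact absurd ((PySem.List.max?_eq_none_iff vals _).mp hmq) hne
        | some m => exact ⟨m, rfl⟩
      rw [hm, Option.getD_some] at hmax
      have hmmem := PySem.List.max?_mem hm
      obtain ⟨c, hcf, hcv⟩ := List.mem_map.mp hmmem
      have hcA : pvCharAt c 1 = 'A' :=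
        pvRankIdx_eq_of_mem _ 'A' (by decide) (by rw [hcv, hmax]; decide)
      have hc : c ∈ all := (List.mem_filter.mp hcf).1
      have hcs : pvCharAt c 0 = s := by
        have := (List.mem_filter.mp hcf).2
        rwa [beq_iff_eq] at this
      exact pv_b1_intro all c hc hcA (by rw [hcs]; exact hlen)
    · rw [if_neg hlen] at hbody
      cases hbody
  · intro h
    rw [List.any_eq_true] at h
    obtain ⟨c, hc, hcond⟩ := h
    rw [Bool.and_eq_true, beq_iff_eq, decide_eq_true_iff] at hcond
    obtain ⟨hcA, hcnt⟩ := hcond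
    rw [pv_count_filter] at hcnt
    rw [List.any_eq_true]
    refine ⟨pvCharAt c 0, ?_, ?_⟩
    · rw [PySem.Set.mem_ofList]
      exact List.mem_map.mpr ⟨c, hc, rfl⟩
    · rw [if_pos hcnt, Bool.and_eq_true, beq_iff_eq, decide_eq_true_iff]
      constructor
      · set flt := List.filter (fun c' => pvCharAt c' 0 == pvCharAt c 0) all with hflt
        set vals := List.map (fun c => pvRankIdx (pvCharAt c 1)) flt with hvals
        have hcf : c ∈ flt := by
          rw [hflt]
          exact List.mem_filter.mpr ⟨hc, by simp⟩
        have h12 : (12 : Int) ∈ vals := by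
          rw [hvals]
          exact List.mem_map.mpr ⟨c, hcf, by rw [hcA]; decide⟩
        obtain ⟨m, hm⟩ : ∃ m, PySem.List.max? vals (fun v => v) = some m := by
          cases hmq : PySem.List.max? vals (fun v => v) with
          | none =>
            rw [(PySem.List.max?_eq_none_iff vals _).mp hmq] at h12
            cases h12
          | some m => exact ⟨m, rfl⟩
        have hge : (12 : Int) ≤ m := PySem.List.max?_isMax hm 12 h12
        have hle : m ≤ 12 := by
          have hmm := PySem.List.max?_mem hm
          rw [hvals] at hmm
          obtain ⟨c', hcf', hcv'⟩ := List.mem_map.mp hmm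
          have hc' : c' ∈ all := by
            rw [hflt] at hcf'
            exact (List.mem_filter.mp hcf').1
          rw [← hcv']
          exact pvRankIdx_le_of_mem _ (hv c' hc')
        rw [hm, Option.getD_some]
        omega
      · rw [PySem.List.count_eq]
        have : 'A' ∈ List.map (fun c => pvCharAt c 1) all :=
          List.mem_map.mpr ⟨c, hc, hcA⟩
        have := List.count_pos_iff.mpr this
        omega

-- A's dedup-sorted window scan over all ranks equals B's broadway membership test
theorem pv_straight_eq (all : List String) (hv : ∀ c ∈ all, pvCharAt c 1 ∈ pvRankOrder) :
    ((PySem.List.pyRange 0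
        (↑(PySem.List.sorted
                (PySem.Set.ofList (List.map pvRankIdx (List.map (fun c => pvCharAt c 1) all)))
                (fun v => v) true).length -
          4)).any
      fun i =>
      (PySem.List.pyGetD
              (PySem.List.slice
                (PySem.List.sorted
                  (PySem.Set.ofList (List.map pvRankIdx (List.map (fun c => pvCharAt c 1) all)))
                  (fun v => v) true)
                (some i) (some (i + 5)))
              0 0 -
            PySem.List.pyGetD
              (PySem.List.slice
                (PySem.List.sorted
                  (PySem.Set.ofList (List.map pvRankIdx (List.map (fun c => pvCharAt c 1) all)))
                  (fun v => v) true)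
                (some i) (some (i + 5)))
              4 0 ==
          4) &&
        (PySem.List.pyGetD
            (PySem.List.slice
              (PySem.List.sorted
                (PySem.Set.ofList (List.map pvRankIdx (List.map (fun c => pvCharAt c 1) all)))
                (fun v => v) true)
              (some i) (some (i + 5)))
            0 0 ==
          12)) =
    (List.all ['T', 'J', 'Q', 'K', 'A'] fun r => (List.map (fun c => pvCharAt c 1) all).contains r) := by
  apply Bool.coe_iff_coe.mp
  rw [pv_window_any, List.all_eq_true]
  set R := List.map (fun c => pvCharAt c 1) all with hR
  set V := List.map pvRankIdx R with hV
  set G := PySem.List.sorted (PySem.Set.ofList V) (fun v => v) true with hG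
  have hmemG : ∀ v : Int, v ∈ G ↔ v ∈ V := by
    intro v
    rw [hG, PySem.List.mem_sorted, PySem.Set.mem_ofList]
  have hRrank : ∀ r ∈ R, r ∈ pvRankOrder := by
    intro r hr
    obtain ⟨c, hc, hcr⟩ := List.mem_map.mp hr
    exact hcr ▸ hv c hc
  have hub : ∀ v ∈ G, v ≤ 12 := by
    intro v hvG
    obtain ⟨r, hrR, hrv⟩ := List.mem_map.mp ((hmemG v).mp hvG)
    exact hrv ▸ pvRankIdx_le_of_mem r (hRrank r hrR)
  have hnd : G.Nodup := (PySem.List.sorted_perm _ _ _).nodup_iff.mpr (PySem.Set.nodup_ofList V)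
  have hple : G.Pairwise (fun a b => b ≤ a) := by
    simpa using PySem.List.sorted_pairwise_rev (PySem.Set.ofList V) (fun v => v)
  have hstrict : G.Pairwise (fun a b => b < a) := (hple.and hnd).imp (fun h => by omega)
  have hchar : ∀ t : Char, t ∈ pvRankOrder → pvRankIdx t ∈ V → t ∈ R := by
    intro t ht hmem
    obtain ⟨r, hrR, hr⟩ := List.mem_map.mp hmem
    exact (pvRankIdx_eq_of_mem r t ht hr) ▸ hrR
  constructor
  · rintro ⟨k, hk4, h12q, h8q⟩
    obtain ⟨hklt, hg12⟩ := List.getElem_of_getElem? h12q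
    obtain ⟨hk4lt, hg8⟩ := List.getElem_of_getElem? h8q
    have hpg := List.pairwise_iff_getElem.mp hstrict
    have c1 := hpg k (k + 1) (by omega) (by omega) (by omega)
    have c2 := hpg (k + 1) (k + 2) (by omega) (by omega) (by omega)
    have c3 := hpg (k + 2) (k + 3) (by omega) (by omega) (by omega)
    have c4 := hpg (k + 3) (k + 4) (by omega) (by omega) (by omega)
    have e1 : G[k + 1]'(by omega) = 11 := by omega
    have e2 : G[k + 2]'(by omega) = 10 := by omega
    have e3 : G[k + 3]'(by omega) = 9 := by omega
    have hmem12 : (12 : Int) ∈ V := (hmemG 12).mp (hg12 ▸ List.getElem_mem hklt)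
    have hmem11 : (11 : Int) ∈ V := (hmemG 11).mp (e1 ▸ List.getElem_mem (by omega : k + 1 < G.length))
    have hmem10 : (10 : Int) ∈ V := (hmemG 10).mp (e2 ▸ List.getElem_mem (by omega : k + 2 < G.length))
    have hmem9 : (9 : Int) ∈ V := (hmemG 9).mp (e3 ▸ List.getElem_mem (by omega : k + 3 < G.length))
    have hmem8 : (8 : Int) ∈ V := (hmemG 8).mp (hg8 ▸ List.getElem_mem hk4lt)
    intro r hr
    rw [List.contains_iff_mem]
    fin_cases hr
    · exact hchar 'T' (by decide) (by simpa using hmem8)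
    · exact hchar 'J' (by decide) (by simpa using hmem9)
    · exact hchar 'Q' (by decide) (by simpa using hmem10)
    · exact hchar 'K' (by decide) (by simpa using hmem11)
    · exact hchar 'A' (by decide) (by simpa using hmem12)
  · intro hall
    have hmm : ∀ t : Char, t ∈ (['T', 'J', 'Q', 'K', 'A'] : List Char) → t ∈ R := by
      intro t ht
      have := hall t ht
      rwa [List.contains_iff_mem] at this
    have g12 : (12 : Int) ∈ G := (hmemG 12).mpr (List.mem_map.mpr ⟨'A', hmm 'A' (by decide), by decide⟩)
    have g11 : (11 : Int) ∈ G := (hmemG 11).mpr (List.mem_map.mpr ⟨'K', hmm 'K' (by decide), by decide⟩)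
    have g10 : (10 : Int) ∈ G := (hmemG 10).mpr (List.mem_map.mpr ⟨'Q', hmm 'Q' (by decide), by decide⟩)
    have g9 : (9 : Int) ∈ G := (hmemG 9).mpr (List.mem_map.mpr ⟨'J', hmm 'J' (by decide), by decide⟩)
    have g8 : (8 : Int) ∈ G := (hmemG 8).mpr (List.mem_map.mpr ⟨'T', hmm 'T' (by decide), by decide⟩)
    obtain ⟨t, hGt⟩ := pv_desc_five G hstrict hub g12 g11 g10 g9 g8
    refine ⟨0, ?_, ?_, ?_⟩ <;> rw [hGt] <;> simp

-- any over set(xs) is any over xs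
theorem pv_any_ofList (l : List Char) (f : Char → Bool) :
    (PySem.Set.ofList l).any f = l.any f := by
  apply Bool.coe_iff_coe.mp
  simp only [List.any_eq_true]
  constructor
  · rintro ⟨x, hx, hfx⟩
    exact ⟨x, (PySem.Set.mem_ofList l x).mp hx, hfx⟩
  · rintro ⟨x, hx, hfx⟩
    exact ⟨x, (PySem.Set.mem_ofList l x).mpr hx, hfx⟩

theorem pv_bool_assemble (a1 a2 c b1 b3 b4 : Bool)
    (h1 : a1 = true → b1 = true) (h2 : a2 = true → b1 = true) :
    (a1 || a2 || c || b1 || b3 || b4) = (b1 || c || b3 || b4) := by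
  cases a1 with
  | true => simp [h1 rfl]
  | false =>
    cases a2 with
    | true => simp [h2 rfl]
    | false => cases c <;> cases b1 <;> simp

theorem pv_main (hole community : List String)
    (hg : ¬ community.length < 5)
    (hv : ∀ c ∈ hole ++ community, pvCharAt c 1 ∈ pvRankOrder) :
    is_nut_py hole community = is_nut_py_alt hole community := by
  unfold is_nut_py is_nut_py_alt
  simp only [if_neg hg]
  rw [pv_nut_eq (hole ++ community) hv, pv_straight_eq (hole ++ community) hv,
    pv_any_ofList _ (fun r =>
      r != 'A' && decide (2 ≤ PySem.List.count (List.map (fun c => pvCharAt c 1) (hole ++ community)) r))]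
  exact pv_bool_assemble _ _ _ _ _ _
    (pv_royal_imp (hole ++ community)) (pv_sflush_imp (hole ++ community))

-- ===== VERDICT (by name: the statement is the Claim_ definition above) =====
theorem is_nut_py_spec : Claim_equal_is_nut_py := by
  intro hole community _ hpre
  unfold Spec_is_nut_py
  by_cases hg : community.length < 5
  · unfold is_nut_py is_nut_py_alt
    simp [hg]
  · rcases hpre with h | hval
    · exact absurd h hg
    · have hv : ∀ c ∈ hole ++ community, pvCharAt c 1 ∈ pvRankOrder := by
        intro c hc
        have := (hval c hc).2
        simpa [pvRankOrder, pvCharAt_eq] using this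
      exact pv_main hole community hg hv
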